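-- pv_equiv track=rewrite | github.com/1000Rym/CodeSkillUp | coding_test/coding_test_with_python/dynamic_programming/q31_mine_craft.py | solution
-- ===== SOURCE A (Python) =====
-- def solution(mines):
--     row = len(mines)
--     column = 0 if row <= 0 else len(mines[0])
--     craft = [[0]*column for _ in range(row)]
--
--     for j in range(column):
--         for i in range(row):
--             if j-1 < 0:
--                 up_left = 0
--                 down_left = 0
--                 left = 0
--             else:
--                 left = craft[i][j-1]
--
--                 if i-1 < 0:
--                     up_left = 0
--                 else:
--                     up_left = craft[i-1][j-1]
--
--                 if i+1 >= row:
--                     down_left = 0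
--                 else:
--                     down_left = craft[i+1][j-1]
--
--
--             craft[i][j] = max(up_left, down_left, left) + mines[i][j]
--
--     return max([craft[i][j] for i in range(row) for j in range(column)])
-- ===== SOURCE B (Python) =====
-- def solution(mines):
--     row = len(mines)
--     column = 0 if row == 0 else len(mines[0])
--     memo = {}
--
--     def f(i, j):
--         if (i, j) not in memo:
--             if j == 0:
--                 best = 0
--             else:
--                 up = f(i - 1, j - 1) if i > 0 else 0
--                 down = f(i + 1, j - 1) if i + 1 < row else 0
--                 best = max(up, down, f(i, j - 1))
--             memo[(i, j)] = best + mines[i][j]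
--         return memo[(i, j)]
--
--     return max(f(i, j) for j in range(column) for i in range(row))
-- ===== Notes on version B (the rewrite author's own statement) =====
-- stated objective: alternative
-- what changed: Replaces A's bottom-up 2D-table fill with top-down memoized recursion: a helper f(i,j) computes the cell value from the recurrence (with 0 for out-of-bounds neighbours) caching results in a dict, and the answer is max of f over all cells; no craft table is ever built.
import Mathlib
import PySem

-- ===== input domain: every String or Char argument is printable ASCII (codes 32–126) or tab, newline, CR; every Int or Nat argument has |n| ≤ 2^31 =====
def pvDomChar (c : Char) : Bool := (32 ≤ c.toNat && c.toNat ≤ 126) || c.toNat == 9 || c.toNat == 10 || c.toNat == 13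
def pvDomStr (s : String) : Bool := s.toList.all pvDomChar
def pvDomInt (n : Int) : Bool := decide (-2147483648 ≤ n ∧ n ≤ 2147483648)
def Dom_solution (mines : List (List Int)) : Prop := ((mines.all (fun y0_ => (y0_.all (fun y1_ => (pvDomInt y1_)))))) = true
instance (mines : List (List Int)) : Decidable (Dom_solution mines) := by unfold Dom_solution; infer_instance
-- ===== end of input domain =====

-- B replaces A's bottom-up 2D-table fill by top-down memoized recursion f(i,j) over the same
-- recurrence (dict memo, answer = max of f over all cells); objective: alternative decomposition.

-- ===== PORT A =====
-- craft[i][j] read/write; inside A's loops the indices are always in range, so getD/set are exact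
def pvGet (c : List (List Int)) (i j : Nat) : Int := (c.getD i []).getD j 0

def pvSet (c : List (List Int)) (i j : Nat) (v : Int) : List (List Int) :=
  c.set i ((c.getD i []).set j v)

-- body of A's inner loop at outer index jz, inner index iz
def craftStep (mines : List (List Int)) (row : Nat) (jz : Int) (c : List (List Int)) (iz : Int) : List (List Int) :=
  let i := iz.toNat
  let j := jz.toNat
  let t : Int × Int × Int :=
    if jz - 1 < 0 then (0, 0, 0)
    else
      let left := pvGet c i (j - 1)
      let upLeft := if iz - 1 < 0 then 0 else pvGet c (i - 1) (j - 1)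
      let downLeft := if iz + 1 ≥ (row : Int) then 0 else pvGet c (i + 1) (j - 1)
      (upLeft, downLeft, left)
  pvSet c i j (max (max t.1 t.2.1) t.2.2 + pvGet mines i j)

def solution (mines : List (List Int)) : Int :=
  let row := mines.length
  let column := if row ≤ 0 then 0 else (mines.headD []).length
  let craft0 := List.replicate row (List.replicate column (0 : Int))
  let craft := (PySem.List.pyRange 0 (column : Int) 1).foldl
    (fun c jz => (PySem.List.pyRange 0 (row : Int) 1).foldl (fun c' iz => craftStep mines row jz c' iz) c)
    craft0
  let vals := (PySem.List.pyRange 0 (row : Int) 1).flatMap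
    (fun iz => (PySem.List.pyRange 0 (column : Int) 1).map (fun jz => pvGet craft iz.toNat jz.toNat))
  ((PySem.List.max? vals (fun x => x)).getD 0)  -- Pre_ guarantees vals ≠ [] (Python max raises on [])

-- ===== PORT B =====
-- mines[i][j]; inside B's calls the indices are always in range, so getD is exact
def mGet (mines : List (List Int)) (i j : Nat) : Int := (mines.getD i []).getD j 0

-- B's helper f(i, j) with the memo dict threaded through explicitly
def fB (mines : List (List Int)) (row : Nat) :
    Nat → Nat → PySem.Dict (Nat × Nat) Int → Int × PySem.Dict (Nat × Nat) Int
  | i, j, memo =>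
    match memo.get? (i, j) with
    | some v => (v, memo)
    | none =>
      match j with
      | 0 =>
        let v := (0 : Int) + mGet mines i 0
        (v, memo.insert (i, 0) v)
      | j' + 1 =>
        let r1 := if 0 < i then fB mines row (i - 1) j' memo else (0, memo)
        let r2 := if i + 1 < row then fB mines row (i + 1) j' r1.2 else (0, r1.2)
        let r3 := fB mines row i j' r2.2
        let v := max (max r1.1 r2.1) r3.1 + mGet mines i (j' + 1)
        (v, r3.2.insert (i, j' + 1) v)
  termination_by i j _ => j

-- max(f(i, j) for j in range(column) for i in range(row)): the generator threads the memo
def solution_alt (mines : List (List Int)) : Int :=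
  let row := mines.length
  let column := if row = 0 then 0 else (mines.headD []).length
  let st := (PySem.List.pyRange 0 (column : Int) 1).foldl
    (fun acc jz =>
      (PySem.List.pyRange 0 (row : Int) 1).foldl
        (fun acc2 iz =>
          let r := fB mines row iz.toNat jz.toNat acc2.2
          (acc2.1 ++ [r.1], r.2)) acc)
    (([] : List Int), PySem.Dict.empty)
  ((PySem.List.max? st.1 (fun x => x)).getD 0)  -- Pre_ guarantees st.1 ≠ []

-- ===== PRECONDITION & SPEC =====
-- Pre_ excludes exactly the inputs where Python A raises: the empty grid / empty first row
-- (ValueError: max of empty sequence) and grids with a row shorter than the first one (IndexError).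
def Pre_solution (mines : List (List Int)) : Prop :=
  mines ≠ [] ∧ mines.headD [] ≠ [] ∧ ∀ r ∈ mines, (mines.headD []).length ≤ r.length
instance (mines : List (List Int)) : Decidable (Pre_solution mines) := by unfold Pre_solution; infer_instance

def pvWitness_solution : List (List Int) := [[1, -2], [3, 4]]

def Spec_solution (mines : List (List Int)) (out : Int) : Prop := out = solution_alt mines
instance (mines : List (List Int)) (out : Int) : Decidable (Spec_solution mines out) := by unfold Spec_solution; infer_instance

-- ===== CLAIM (what is proved, stated in full; the proofs are below) =====
def Claim_equal_solution : Prop := ∀ (mines : List (List Int)), Dom_solution mines → Pre_solution mines → Spec_solution mines (solution mines)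

-- ===== LEMMAS AND PROOFS =====

-- the DP value at cell (i, j): mathematical characterisation shared by both proofs
def fV (mines : List (List Int)) : Nat → Nat → Int
  | i, 0 => (mines.getD i []).getD 0 0
  | i, j + 1 =>
      max (max (if i = 0 then 0 else fV mines (i - 1) j)
               (if i + 1 < mines.length then fV mines (i + 1) j else 0))
          (fV mines i j)
      + (mines.getD i []).getD (j + 1) 0
termination_by i j => j

theorem getD_set_self {α : Type} (l : List α) (i : Nat) (a d : α) (h : i < l.length) :
    (l.set i a).getD i d = a := by
  simp [List.getD_eq_getElem?_getD, h]

theorem getD_set_ne {α : Type} (l : List α) (i j : Nat) (a d : α) (h : i ≠ j) :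
    (l.set i a).getD j d = l.getD j d := by
  simp [List.getD_eq_getElem?_getD, h]

theorem pvSet_length (c : List (List Int)) (i j : Nat) (v : Int) :
    (pvSet c i j v).length = c.length := by
  simp [pvSet]

theorem pvSet_rowlen (c : List (List Int)) (i j : Nat) (v : Int) (i' : Nat) (hi : i < c.length) :
    ((pvSet c i j v).getD i' []).length = (c.getD i' []).length := by
  unfold pvSet
  by_cases h : i' = i
  · subst h; rw [getD_set_self _ _ _ _ hi]; simp
  · rw [getD_set_ne _ _ _ _ _ (fun hh => h hh.symm)]

theorem pvGet_pvSet (c : List (List Int)) (i j : Nat) (v : Int) (i' j' : Nat)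
    (hi : i < c.length) (hj : j < (c.getD i []).length) :
    pvGet (pvSet c i j v) i' j' = if i' = i ∧ j' = j then v else pvGet c i' j' := by
  unfold pvGet pvSet
  by_cases h1 : i' = i
  · subst h1
    rw [getD_set_self _ _ _ _ hi]
    by_cases h2 : j' = j
    · subst h2; rw [getD_set_self _ _ _ _ hj, if_pos ⟨rfl, rfl⟩]
    · rw [getD_set_ne _ _ _ _ _ (fun hh => h2 hh.symm), if_neg (by tauto)]
  · rw [getD_set_ne _ _ _ _ _ (fun hh => h1 hh.symm), if_neg (by tauto)]

-- invariant for A's table: dimensions plus "cells satisfying P already hold the DP value"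
def GInv (mines : List (List Int)) (C : Nat) (P : Nat → Nat → Prop) (c : List (List Int)) : Prop :=
  c.length = mines.length ∧ (∀ i, i < mines.length → (c.getD i []).length = C) ∧
  (∀ i j, i < mines.length → j < C → P i j → pvGet c i j = fV mines i j)

theorem GInv_antitone (mines : List (List Int)) (C : Nat) (P Q : Nat → Nat → Prop)
    (c : List (List Int)) (h : ∀ i j, i < mines.length → j < C → Q i j → P i j) :
    GInv mines C P c → GInv mines C Q c := by
  rintro ⟨h1, h2, h3⟩
  exact ⟨h1, h2, fun i j hi hj hq => h3 i j hi hj (h i j hi hj hq)⟩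

theorem inner_inv (mines : List (List Int)) (C j : Nat) (hjC : j < C) (c : List (List Int)) :
    ∀ k, k ≤ mines.length → GInv mines C (fun _ j' => j' < j) c →
    GInv mines C (fun i' j' => j' < j ∨ (j' = j ∧ i' < k))
      ((PySem.List.pyRange 0 (k : Int) 1).foldl
        (fun c' iz => craftStep mines mines.length ((j : Nat) : Int) c' iz) c) := by
  intro k
  induction k with
  | zero =>
    intro _ hc
    simp only [Nat.cast_zero]
    rw [PySem.List.pyRange_one_eq_nil (le_refl 0)]
    simp only [List.foldl_nil]
    exact GInv_antitone _ _ _ _ _ (by intro i' j' _ _ h; omega) hc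
  | succ k ih =>
    intro hk hc
    have hst := ih (by omega) hc
    rw [show (((k + 1 : Nat) : Int)) = (k : Int) + 1 by push_cast; ring,
        PySem.List.pyRange_one_succ_right (by positivity), List.foldl_append]
    simp only [List.foldl_cons, List.foldl_nil]
    set st := (PySem.List.pyRange 0 (k : Int) 1).foldl
      (fun c' iz => craftStep mines mines.length ((j : Nat) : Int) c' iz) c with hstdef
    obtain ⟨hlen, hrow, hval⟩ := hst
    have hkR : k < mines.length := by omega
    -- the value computed for cell (k, j) is the DP value
    have hvfV : ∀ t : Int × Int × Int,
        (if ((j : Int) - 1 < 0) then ((0, 0, 0) : Int × Int × Int)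
         else (if ((k : Int) - 1 < 0) then 0 else pvGet st (k - 1) (j - 1),
               if ((k : Int) + 1 ≥ (mines.length : Int)) then 0 else pvGet st (k + 1) (j - 1),
               pvGet st k (j - 1))) = t →
        max (max t.1 t.2.1) t.2.2 + pvGet mines k j = fV mines k j := by
      intro t ht
      cases j with
      | zero =>
        rw [if_pos (by norm_num)] at ht
        subst ht
        simp [fV, pvGet]
      | succ s =>
        rw [if_neg (by push_cast; omega)] at ht
        subst ht
        simp only [Nat.add_sub_cancel]
        have hleft : pvGet st k s = fV mines k s :=
          hval k s hkR (by omega) (by omega)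
        have hup : (if ((k : Int) - 1 < 0) then (0 : Int) else pvGet st (k - 1) s)
            = (if k = 0 then 0 else fV mines (k - 1) s) := by
          by_cases hk0 : k = 0
          · rw [if_pos (by omega : (k : Int) - 1 < 0), if_pos hk0]
          · rw [if_neg (by omega : ¬ ((k : Int) - 1 < 0)), if_neg hk0,
                hval (k - 1) s (by omega) (by omega) (by omega)]
        have hdown : (if ((k : Int) + 1 ≥ (mines.length : Int)) then (0 : Int)
              else pvGet st (k + 1) s)
            = (if k + 1 < mines.length then fV mines (k + 1) s else 0) := by
          by_cases hkd : k + 1 < mines.length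
          · rw [if_neg (by omega), if_pos hkd,
                hval (k + 1) s (by omega) (by omega) (by omega)]
          · rw [if_pos (by omega), if_neg hkd]
        rw [hleft, hup, hdown]
        simp [fV, pvGet]
    simp only [craftStep, Int.toNat_natCast]
    refine ⟨by rw [pvSet_length, hlen], ?_, ?_⟩
    · intro i hi
      rw [pvSet_rowlen _ _ _ _ _ (by omega)]
      exact hrow i hi
    · intro i' j' hi' hj' hP
      rw [pvGet_pvSet _ _ _ _ _ _ (by omega) (by rw [hrow k hkR]; omega)]
      by_cases heq : i' = k ∧ j' = j
      · rw [if_pos heq]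
        obtain ⟨rfl, rfl⟩ := heq
        exact hvfV _ rfl
      · rw [if_neg heq]
        refine hval i' j' hi' hj' ?_
        rcases hP with h | ⟨rfl, h⟩
        · exact Or.inl h
        · exact Or.inr ⟨rfl, by omega⟩

theorem outer_inv (mines : List (List Int)) (C : Nat) :
    ∀ m, m ≤ C →
    GInv mines C (fun _ j' => j' < m)
      ((PySem.List.pyRange 0 (m : Int) 1).foldl
        (fun c jz => (PySem.List.pyRange 0 ((mines.length : Nat) : Int) 1).foldl
          (fun c' iz => craftStep mines mines.length jz c' iz) c)
        (List.replicate mines.length (List.replicate C (0 : Int)))) := by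
  intro m
  induction m with
  | zero =>
    intro _
    simp only [Nat.cast_zero]
    rw [PySem.List.pyRange_one_eq_nil (le_refl 0)]
    simp only [List.foldl_nil]
    refine ⟨by simp, ?_, ?_⟩
    · intro i hi
      rw [show (List.replicate mines.length (List.replicate C (0 : Int))).getD i []
            = List.replicate C (0 : Int) by simp [List.getD_eq_getElem?_getD, hi]]
      simp
    · intro i j _ _ h; omega
  | succ m ih =>
    intro hm
    rw [show (((m + 1 : Nat) : Int)) = (m : Int) + 1 by push_cast; ring,
        PySem.List.pyRange_one_succ_right (by positivity), List.foldl_append]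
    simp only [List.foldl_cons, List.foldl_nil]
    have h1 := inner_inv mines C m (by omega) _ mines.length (le_refl _) (ih (by omega))
    exact GInv_antitone _ _ _ _ _ (by intro i' j' hi' _ h; omega) h1

-- ===== B-side lemmas: the memoized recursion computes fV =====
def MemoInv (mines : List (List Int)) (memo : PySem.Dict (Nat × Nat) Int) : Prop :=
  ∀ i j v, memo.get? (i, j) = some v → v = fV mines i j

theorem MemoInv_empty (mines : List (List Int)) : MemoInv mines PySem.Dict.empty := by
  intro i j v h
  simp [PySem.Dict.get?_empty] at h

theorem MemoInv_insert (mines : List (List Int)) (memo : PySem.Dict (Nat × Nat) Int)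
    (i j : Nat) (v : Int) (hm : MemoInv mines memo) (hv : v = fV mines i j) :
    MemoInv mines (memo.insert (i, j) v) := by
  intro a b w hw
  rw [PySem.Dict.get?_insert] at hw
  by_cases h : (a, b) = ((i, j) : Nat × Nat)
  · rw [if_pos h] at hw
    obtain ⟨rfl, rfl⟩ := Prod.mk.injEq .. ▸ h
    cases hw; exact hv
  · rw [if_neg h] at hw
    exact hm a b w hw

theorem fB_correct (mines : List (List Int)) :
    ∀ (j i : Nat) (memo : PySem.Dict (Nat × Nat) Int), MemoInv mines memo →
      (fB mines mines.length i j memo).1 = fV mines i j ∧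
      MemoInv mines (fB mines mines.length i j memo).2 := by
  intro j
  induction j with
  | zero =>
    intro i memo hm
    rw [fB.eq_def]
    cases h : memo.get? (i, 0) with
    | some v => simp only [h]; exact ⟨hm i 0 v h, hm⟩
    | none =>
      simp only [h]
      have hv : (0 : Int) + mGet mines i 0 = fV mines i 0 := by
        simp [fV, mGet]
      exact ⟨hv, MemoInv_insert mines memo i 0 _ hm hv⟩
  | succ j' ih =>
    intro i memo hm
    rw [fB.eq_def]
    cases h : memo.get? (i, j' + 1) with
    | some v => simp only [h]; exact ⟨hm i (j' + 1) v h, hm⟩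
    | none =>
      simp only [h]
      have h1 : (if 0 < i then fB mines mines.length (i - 1) j' memo else (0, memo)).1
            = (if i = 0 then 0 else fV mines (i - 1) j') ∧
          MemoInv mines (if 0 < i then fB mines mines.length (i - 1) j' memo else (0, memo)).2 := by
        by_cases hi : 0 < i
        · rw [if_pos hi, if_neg (by omega)]
          exact ih (i - 1) memo hm
        · rw [if_neg hi, if_pos (by omega)]
          exact ⟨rfl, hm⟩
      obtain ⟨hup, hm1⟩ := h1
      set r1 := if 0 < i then fB mines mines.length (i - 1) j' memo else (0, memo) with hr1
      have h2 : (if i + 1 < mines.length then fB mines mines.length (i + 1) j' r1.2 else (0, r1.2)).1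
            = (if i + 1 < mines.length then fV mines (i + 1) j' else 0) ∧
          MemoInv mines (if i + 1 < mines.length then fB mines mines.length (i + 1) j' r1.2 else (0, r1.2)).2 := by
        by_cases hi : i + 1 < mines.length
        · rw [if_pos hi, if_pos hi]
          exact ih (i + 1) r1.2 hm1
        · rw [if_neg hi, if_neg hi]
          exact ⟨rfl, hm1⟩
      obtain ⟨hdown, hm2⟩ := h2
      set r2 := if i + 1 < mines.length then fB mines mines.length (i + 1) j' r1.2 else (0, r1.2) with hr2
      obtain ⟨hleft, hm3⟩ := ih i r2.2 hm2
      set r3 := fB mines mines.length i j' r2.2 with hr3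
      have hv : max (max r1.1 r2.1) r3.1 + mGet mines i (j' + 1) = fV mines i (j' + 1) := by
        rw [hup, hdown, hleft]
        simp [fV, mGet]
      exact ⟨hv, MemoInv_insert mines r3.2 i (j' + 1) _ hm3 hv⟩

-- the inner fold (i over range(row)) appends column j's values and keeps the memo invariant
theorem innerB (mines : List (List Int)) (j : Nat) :
    ∀ (k : Nat), k ≤ mines.length → ∀ (acc : List Int × PySem.Dict (Nat × Nat) Int),
      MemoInv mines acc.2 →
      ((PySem.List.pyRange 0 (k : Int) 1).foldl
          (fun acc2 iz =>
            let r := fB mines mines.length iz.toNat j acc2.2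
            (acc2.1 ++ [r.1], r.2)) acc).1
        = acc.1 ++ (List.range k).map (fun i => fV mines i j) ∧
      MemoInv mines ((PySem.List.pyRange 0 (k : Int) 1).foldl
          (fun acc2 iz =>
            let r := fB mines mines.length iz.toNat j acc2.2
            (acc2.1 ++ [r.1], r.2)) acc).2 := by
  intro k
  induction k with
  | zero =>
    intro _ acc hm
    simp only [Nat.cast_zero]
    rw [PySem.List.pyRange_one_eq_nil (le_refl 0)]
    simp [hm]
  | succ k ih =>
    intro hk acc hm
    rw [show (((k + 1 : Nat) : Int)) = (k : Int) + 1 by push_cast; ring,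
        PySem.List.pyRange_one_succ_right (by positivity), List.foldl_append]
    obtain ⟨ihv, ihm⟩ := ih (by omega) acc hm
    simp only [List.foldl_cons, List.foldl_nil, Int.toNat_natCast]
    
    obtain ⟨hfv, hfm⟩ := fB_correct mines j k _ ihm
    refine ⟨?_, hfm⟩
    rw [ihv, hfv, List.range_succ]
    simp

-- the outer fold (j over range(column)) builds all DP values in j-major order
theorem outerB (mines : List (List Int)) :
    ∀ (m : Nat),
      ((PySem.List.pyRange 0 (m : Int) 1).foldl
          (fun acc jz =>
            (PySem.List.pyRange 0 ((mines.length : Nat) : Int) 1).foldl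
              (fun acc2 iz =>
                let r := fB mines mines.length iz.toNat jz.toNat acc2.2
                (acc2.1 ++ [r.1], r.2)) acc)
          (([] : List Int), PySem.Dict.empty)).1
        = (List.range m).flatMap (fun j => (List.range mines.length).map (fun i => fV mines i j)) ∧
      MemoInv mines ((PySem.List.pyRange 0 (m : Int) 1).foldl
          (fun acc jz =>
            (PySem.List.pyRange 0 ((mines.length : Nat) : Int) 1).foldl
              (fun acc2 iz =>
                let r := fB mines mines.length iz.toNat jz.toNat acc2.2
                (acc2.1 ++ [r.1], r.2)) acc)
          (([] : List Int), PySem.Dict.empty)).2 := by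
  intro m
  induction m with
  | zero =>
    simp only [Nat.cast_zero]
    rw [PySem.List.pyRange_one_eq_nil (le_refl 0)]
    exact ⟨by simp, MemoInv_empty mines⟩
  | succ m ih =>
    rw [show (((m + 1 : Nat) : Int)) = (m : Int) + 1 by push_cast; ring,
        PySem.List.pyRange_one_succ_right (by positivity), List.foldl_append]
    obtain ⟨ihv, ihm⟩ := ih
    simp only [List.foldl_cons, List.foldl_nil, Int.toNat_natCast]
    obtain ⟨hv, hm⟩ := innerB mines m mines.length (le_refl _) _ ihm
    refine ⟨?_, hm⟩
    rw [hv, ihv, List.range_succ]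
    simp

theorem craft_val (mines : List (List Int)) (C : Nat) (i j : Nat)
    (hi : i < mines.length) (hj : j < C) :
    pvGet ((PySem.List.pyRange 0 (C : Int) 1).foldl
        (fun c jz => (PySem.List.pyRange 0 ((mines.length : Nat) : Int) 1).foldl
          (fun c' iz => craftStep mines mines.length jz c' iz) c)
        (List.replicate mines.length (List.replicate C (0 : Int)))) i j = fV mines i j := by
  obtain ⟨_, _, h3⟩ := outer_inv mines C C (le_refl C)
  exact h3 i j hi hj hj

theorem valsA_mem (mines : List (List Int)) (C : Nat) (x : Int) :
    x ∈ (PySem.List.pyRange 0 ((mines.length : Nat) : Int) 1).flatMap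
      (fun iz => (PySem.List.pyRange 0 (C : Int) 1).map
        (fun jz => pvGet ((PySem.List.pyRange 0 (C : Int) 1).foldl
          (fun c jz => (PySem.List.pyRange 0 ((mines.length : Nat) : Int) 1).foldl
            (fun c' iz => craftStep mines mines.length jz c' iz) c)
          (List.replicate mines.length (List.replicate C (0 : Int)))) iz.toNat jz.toNat))
    ↔ ∃ i j, i < mines.length ∧ j < C ∧ x = fV mines i j := by
  constructor
  · intro hx
    rw [List.mem_flatMap] at hx
    obtain ⟨iz, hiz, hx⟩ := hx
    rw [List.mem_map] at hx
    obtain ⟨jz, hjz, hx⟩ := hx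
    rw [PySem.List.mem_pyRange_one] at hiz hjz
    refine ⟨iz.toNat, jz.toNat, by omega, by omega, ?_⟩
    rw [← hx]
    exact craft_val mines C iz.toNat jz.toNat (by omega) (by omega)
  · rintro ⟨i, j, hi, hj, rfl⟩
    refine List.mem_flatMap.mpr ⟨(i : Int),
      PySem.List.mem_pyRange_one.mpr ⟨by positivity, by exact_mod_cast hi⟩,
      List.mem_map.mpr ⟨(j : Int),
        PySem.List.mem_pyRange_one.mpr ⟨by positivity, by exact_mod_cast hj⟩, ?_⟩⟩
    simp only [Int.toNat_natCast]
    exact craft_val mines C i j hi hj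

theorem valsB_mem (mines : List (List Int)) (C : Nat) (x : Int) :
    x ∈ (List.range C).flatMap
      (fun j => (List.range mines.length).map (fun i => fV mines i j))
    ↔ ∃ i j, i < mines.length ∧ j < C ∧ x = fV mines i j := by
  constructor
  · intro hx
    rw [List.mem_flatMap] at hx
    obtain ⟨j, hj, hx⟩ := hx
    rw [List.mem_map] at hx
    obtain ⟨i, hi, hx⟩ := hx
    rw [List.mem_range] at hi hj
    exact ⟨i, j, hi, hj, hx.symm⟩
  · rintro ⟨i, j, hi, hj, rfl⟩
    exact List.mem_flatMap.mpr ⟨j, List.mem_range.mpr hj,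
      List.mem_map.mpr ⟨i, List.mem_range.mpr hi, rfl⟩⟩

theorem max_ext (l1 l2 : List Int) (S : Int → Prop)
    (h1 : ∀ x, x ∈ l1 ↔ S x) (h2 : ∀ x, x ∈ l2 ↔ S x) (x0 : Int) (hx0 : S x0) :
    (PySem.List.max? l1 (fun x => x)).getD 0 = (PySem.List.max? l2 (fun x => x)).getD 0 := by
  cases hmaxA : PySem.List.max? l1 (fun x => x) with
  | none =>
    rw [PySem.List.max?_eq_none_iff] at hmaxA
    exact absurd ((h1 x0).mpr hx0) (by rw [hmaxA]; simp)
  | some mA =>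
    cases hmaxB : PySem.List.max? l2 (fun x => x) with
    | none =>
      rw [PySem.List.max?_eq_none_iff] at hmaxB
      exact absurd ((h2 x0).mpr hx0) (by rw [hmaxB]; simp)
    | some mB =>
      have hmA := PySem.List.max?_mem hmaxA
      have hmB := PySem.List.max?_mem hmaxB
      have hle1 : mA ≤ mB := PySem.List.max?_isMax hmaxB mA ((h2 _).mpr ((h1 _).mp hmA))
      have hle2 : mB ≤ mA := PySem.List.max?_isMax hmaxA mB ((h1 _).mpr ((h2 _).mp hmB))
      simp [le_antisymm hle1 hle2]

-- ===== VERDICT (by name: the statement is the Claim_ definition above) =====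
theorem solution_spec : Claim_equal_solution := by
  unfold Claim_equal_solution Spec_solution
  intro mines _ hPre
  obtain ⟨h1, h2, _⟩ := hPre
  have hR : 0 < mines.length := List.length_pos_of_ne_nil h1
  have hC : 0 < (mines.headD []).length := List.length_pos_of_ne_nil h2
  simp only [solution, solution_alt]
  rw [if_neg (by omega : ¬ mines.length ≤ 0), if_neg (by omega : ¬ mines.length = 0)]
  rw [(outerB mines ((mines.headD []).length)).1]
  exact max_ext _ _ (fun x => ∃ i j, i < mines.length ∧ j < (mines.headD []).length ∧
      x = fV mines i j)
    (valsA_mem mines ((mines.headD []).length))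
    (valsB_mem mines ((mines.headD []).length))
    (fV mines 0 0) ⟨0, 0, hR, hC, rfl⟩
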